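-- pv_equiv track=rewrite | github.com/sneha5gsm/Data-Structures-and-Algorithms-Exercises | Practice Problems/another_array_revolve.py | query2
-- ===== SOURCE A (Python) =====
-- def query2(N, Arr, L, R):
--     ans = 0
--     L = L - 1
--     R = R - 1
--     # print '---- second'
--     # print L
--     # print R
--     while L!=R:
--         if L==N:
--             L=0
--         else:
--             ans = ans + Arr[L]
--             L=L+1
--         # print L
--     ans = ans+Arr[R]
--     ans = ans%1000000007
--     return ans
-- ===== SOURCE B (Python) =====
-- def query2(N, Arr, L, R):
--     # circular range sum via a prefix-sum table; negative circular positions wrap by +n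
--     prefix = [0]
--     s = 0
--     for x in Arr:
--         s += x
--         prefix.append(s)
--     n = len(Arr)
--     a = L - 1
--     b = R - 1
--     if a < 0:
--         a += n
--     if b < 0:
--         b += n
--     if a <= b:
--         ans = prefix[b + 1] - prefix[a]
--     else:
--         ans = (prefix[n] - prefix[a]) + prefix[b + 1]
--     return ans % 1000000007
-- ===== Notes on version B (the rewrite author's own statement) =====
-- stated objective: alternative
-- what changed: The per-element circular while-loop scan is replaced by building a prefix-sum table once, reducing the circular endpoints mod len(Arr), and computing the (possibly wrapping) range sum as a closed-form subtraction of prefix values.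
-- outside the precondition, e.g. on query2(-1, [3, 5], -1, 1): A returns 6, B returns 3; on query2(1, [3, 5], 2, 1): A returns 3, B returns 8; on query2(3, [1, 2, 3], 0, 3): A returns 9, B returns 3
import Mathlib
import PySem

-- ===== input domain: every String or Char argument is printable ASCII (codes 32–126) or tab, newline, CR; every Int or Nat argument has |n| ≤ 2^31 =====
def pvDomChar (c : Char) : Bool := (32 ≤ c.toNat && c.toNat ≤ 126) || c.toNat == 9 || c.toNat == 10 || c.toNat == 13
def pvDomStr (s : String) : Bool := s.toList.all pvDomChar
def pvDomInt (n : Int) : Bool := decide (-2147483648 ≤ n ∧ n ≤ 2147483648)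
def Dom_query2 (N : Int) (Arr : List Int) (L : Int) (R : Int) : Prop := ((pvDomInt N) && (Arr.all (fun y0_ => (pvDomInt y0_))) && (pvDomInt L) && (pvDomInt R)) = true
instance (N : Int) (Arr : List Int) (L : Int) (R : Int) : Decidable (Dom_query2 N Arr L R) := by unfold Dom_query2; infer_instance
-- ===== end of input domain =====

-- B replaces A's per-element circular while-loop by a prefix-sum table, wrap-by-+n index normalisation and a closed-form subtraction (alternative decomposition, same cost).


-- ===== PORT A =====
-- A's while-loop, step for step; the fuel argument only makes the recursion total
-- (it is never exhausted under Pre_query2, where the loop runs at most 2·len(Arr)+1 iterations).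
def query2Loop (N : Int) (Arr : List Int) : Nat → Int → Int → Int → Int
  | fuel, L, R, ans =>
    if L = R then ans
    else match fuel with
      | 0 => ans
      | f + 1 =>
        if L = N then query2Loop N Arr f 0 R ans
        else query2Loop N Arr f (L + 1) R (ans + PySem.List.pyGetD Arr L 0)
def query2 (N : Int) (Arr : List Int) (L : Int) (R : Int) : Int :=
  let L' := L - 1
  let R' := R - 1
  let ans := query2Loop N Arr (Arr.length * 2 + 2) L' R' 0
  PySem.Int.mod (ans + PySem.List.pyGetD Arr R' 0) 1000000007
-- ===== PORT B =====
def query2_alt (N : Int) (Arr : List Int) (L : Int) (R : Int) : Int :=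
  let pre := (Arr.foldl (fun (st : Int × List Int) x => (st.1 + x, st.2 ++ [st.1 + x])) (0, [0])).2
  let n := (Arr.length : Int)
  let a := L - 1
  let b := R - 1
  let a := if a < 0 then a + n else a
  let b := if b < 0 then b + n else b
  let ans :=
    if a ≤ b then PySem.List.pyGetD pre (b + 1) 0 - PySem.List.pyGetD pre a 0
    else (PySem.List.pyGetD pre n 0 - PySem.List.pyGetD pre a 0) + PySem.List.pyGetD pre (b + 1) 0
  PySem.Int.mod ans 1000000007
-- ===== PRECONDITION & SPEC =====
-- Pre_ excludes the inputs where A raises IndexError or never terminates, and the corners where a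
-- caller-supplied N different from len(Arr) truncates or re-enters A's scan, or a negative start index
-- spans more than one full revolution — accidental values of A's direct use of N and Python index wraparound.
def Pre_query2 (N : Int) (Arr : List Int) (L : Int) (R : Int) : Prop :=
  1 ≤ Arr.length ∧ -(Arr.length : Int) ≤ L - 1 ∧ L - 1 < Arr.length
    ∧ -(Arr.length : Int) ≤ R - 1 ∧ R - 1 < Arr.length
    ∧ (if L - 1 ≤ R - 1
        then ¬(L - 1 ≤ N ∧ N < R - 1) ∧ R - 1 - (L - 1) < Arr.length
        else 0 ≤ R - 1 ∧ N = Arr.length)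
instance (N : Int) (Arr : List Int) (L : Int) (R : Int) : Decidable (Pre_query2 N Arr L R) := by unfold Pre_query2; infer_instance
def pvWitness_query2 : Int × List Int × Int × Int := (7, ([1, 2, 3, 4, 5], 3, 4))

def Spec_query2 (N : Int) (Arr : List Int) (L : Int) (R : Int) (out : Int) : Prop := out = query2_alt N Arr L R
instance (N : Int) (Arr : List Int) (L : Int) (R : Int) (out : Int) : Decidable (Spec_query2 N Arr L R out) := by unfold Spec_query2; infer_instance

-- ===== CLAIM (what is proved, stated in full; the proofs are below) =====
def Claim_equal_query2 : Prop := ∀ (N : Int) (Arr : List Int) (L : Int) (R : Int), Dom_query2 N Arr L R → Pre_query2 N Arr L R → Spec_query2 N Arr L R (query2 N Arr L R)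

-- ===== LEMMAS AND PROOFS =====

-- prefix sums: P Arr i = sum of the first i elements of Arr
def P (Arr : List Int) (i : Nat) : Int := (Arr.take i).sum
lemma P_succ (Arr : List Int) (n : Nat) (h : n < Arr.length) :
    P Arr (n + 1) = P Arr n + Arr.getD n 0 := by
  rw [List.getD_eq_getElem Arr 0 h]
  exact List.sum_take_succ Arr n h
-- Python's Arr[l] for a negative in-range l
lemma pyGetD_negIdx (Arr : List Int) (l : Int) (h1 : -(Arr.length : Int) ≤ l) (h2 : l < 0) :
    PySem.List.pyGetD Arr l 0 = Arr.getD ((Arr.length : Int) + l).toNat 0 := by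
  obtain ⟨k, rfl⟩ : ∃ k : Nat, l = -(k : Int) := ⟨(-l).toNat, by omega⟩
  rw [PySem.List.pyGetD_neg_natCast Arr k 0 (by omega) (by omega)]
  rw [List.getD_eq_getElem Arr 0 (by omega : ((Arr.length : Int) + -(k:Int)).toNat < Arr.length)]
  congr 1
  omega
-- A's loop over a plain segment 0 ≤ l..r (never hitting the reset index N) sums Arr[l..r-1]
lemma loop_nowrap (Arr : List Int) (N r : Int) (hr : r ≤ (Arr.length : Int)) :
    ∀ (f : Nat) (l ans : Int), 0 ≤ l → l ≤ r → ¬(l ≤ N ∧ N < r) → (r - l).toNat ≤ f →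
      query2Loop N Arr f l r ans = ans + (P Arr r.toNat - P Arr l.toNat) := by
  intro f
  induction f with
  | zero =>
    intro l ans h0 hlr hN hf
    have : l = r := by omega
    subst this
    simp [query2Loop]
  | succ f ih =>
    intro l ans h0 hlr hN hf
    by_cases hlr' : l = r
    · subst hlr'; simp [query2Loop]
    · rw [query2Loop]
      simp only [if_neg hlr', if_neg (by omega : ¬ l = N)]
      rw [ih (l + 1) _ (by omega) (by omega) (by omega) (by omega)]
      rw [PySem.List.pyGetD_of_nonneg _ _ h0]
      rw [(by omega : (l + 1).toNat = l.toNat + 1), P_succ Arr l.toNat (by omega)]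
      ring
-- A's loop over an all-negative segment l..r: Python indexing reads the last elements
lemma loop_negseg (Arr : List Int) (N r : Int) (hr : r < 0) :
    ∀ (f : Nat) (l ans : Int), -(Arr.length : Int) ≤ l → l ≤ r → ¬(l ≤ N ∧ N < r) → (r - l).toNat ≤ f →
      query2Loop N Arr f l r ans
        = ans + (P Arr ((Arr.length : Int) + r).toNat - P Arr ((Arr.length : Int) + l).toNat) := by
  intro f
  induction f with
  | zero =>
    intro l ans h0 hlr hN hf
    have : l = r := by omega
    subst this
    simp [query2Loop]
  | succ f ih =>
    intro l ans h0 hlr hN hf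
    by_cases hlr' : l = r
    · subst hlr'; simp [query2Loop]
    · rw [query2Loop]
      simp only [if_neg hlr', if_neg (by omega : ¬ l = N)]
      rw [ih (l + 1) _ (by omega) (by omega) (by omega) (by omega)]
      rw [pyGetD_negIdx Arr l h0 (by omega)]
      rw [(by omega : ((Arr.length : Int) + (l + 1)).toNat = ((Arr.length : Int) + l).toNat + 1),
        P_succ Arr ((Arr.length : Int) + l).toNat (by omega)]
      ring
-- A's loop from a negative l up across 0 to r: last elements, then the first r
lemma loop_cross (Arr : List Int) (N r : Int) (hr0 : 0 ≤ r) (hrn : r ≤ (Arr.length : Int)) :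
    ∀ (f : Nat) (l ans : Int), -(Arr.length : Int) ≤ l → l < 0 → ¬(l ≤ N ∧ N < r) → (r - l).toNat ≤ f →
      query2Loop N Arr f l r ans
        = ans + (P Arr Arr.length - P Arr ((Arr.length : Int) + l).toNat) + P Arr r.toNat := by
  intro f
  induction f with
  | zero => intro l ans h0 hl hN hf; omega
  | succ f ih =>
    intro l ans h0 hl hN hf
    rw [query2Loop]
    simp only [if_neg (by omega : ¬ l = r), if_neg (by omega : ¬ l = N)]
    rw [pyGetD_negIdx Arr l h0 hl]
    by_cases hl1 : l + 1 = 0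
    · rw [hl1]
      rw [loop_nowrap Arr N r hrn f 0 _ le_rfl (by omega) (by omega) (by omega)]
      have : ((Arr.length : Int) + l).toNat + 1 = Arr.length := by omega
      have hP := P_succ Arr ((Arr.length : Int) + l).toNat (by omega)
      rw [this] at hP
      simp only [P] at *
      rw [hP]
      simp only [Int.toNat_zero, List.take_zero, List.sum_nil, sub_zero]
      ring
    · rw [ih (l + 1) _ (by omega) (by omega) (by omega) (by omega)]
      rw [(by omega : ((Arr.length : Int) + (l + 1)).toNat = ((Arr.length : Int) + l).toNat + 1),
        P_succ Arr ((Arr.length : Int) + l).toNat (by omega)]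
      ring
-- A's loop when it wraps at N = len(Arr): climbs l..N-1, resets to 0, then climbs to r
lemma loop_wrap (Arr : List Int) (r : Int) (hr0 : 0 ≤ r) (hrN : r < (Arr.length : Int)) :
    ∀ (f : Nat) (l ans : Int), r < l → l ≤ (Arr.length : Int) →
      (((Arr.length : Int) - l).toNat + 1 + r.toNat) ≤ f →
      query2Loop (Arr.length : Int) Arr f l r ans
        = ans + (P Arr Arr.length - P Arr l.toNat) + P Arr r.toNat := by
  intro f
  induction f with
  | zero => intro l ans h1 h2 hf; omega
  | succ f ih =>
    intro l ans h1 h2 hf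
    by_cases hlN : l = (Arr.length : Int)
    · subst hlN
      rw [query2Loop]
      simp only [if_neg (by omega : ¬ (Arr.length : Int) = r)]
      rw [loop_nowrap Arr (Arr.length : Int) r (by omega) f 0 ans (by omega) (by omega) (by omega) (by omega)]
      simp [P]
    · rw [query2Loop]
      simp only [if_neg (by omega : ¬ l = r), if_neg hlN]
      rw [ih (l + 1) _ (by omega) (by omega) (by omega)]
      rw [PySem.List.pyGetD_of_nonneg _ _ (by omega)]
      rw [(by omega : (l + 1).toNat = l.toNat + 1), P_succ Arr l.toNat (by omega)]
      ring
-- B's foldl builds the list of all prefix sums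
lemma foldl_prefix (Arr : List Int) : ∀ (s : Int) (p : List Int),
    Arr.foldl (fun (st : Int × List Int) x => (st.1 + x, st.2 ++ [st.1 + x])) (s, p)
      = (s + Arr.sum, p ++ (List.range Arr.length).map (fun i => s + P Arr (i + 1))) := by
  induction Arr with
  | nil => intro s p; simp [P]
  | cons x xs ih =>
    intro s p
    simp only [List.foldl_cons, ih (s + x) (p ++ [s + x]), List.length_cons,
      List.range_succ_eq_map, List.map_cons, List.map_map]
    refine Prod.ext ?_ ?_
    · simp [List.sum_cons]; ring
    · simp only [P, List.take_succ_cons, List.sum_cons, List.append_assoc, List.singleton_append]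
      simp only [List.take_zero, List.sum_nil, add_zero]
      congr 1
      congr 1
      apply List.map_congr_left
      intro i hi
      simp only [Function.comp, Nat.succ_eq_add_one]
      ring
lemma pre_eq (Arr : List Int) :
    (Arr.foldl (fun (st : Int × List Int) x => (st.1 + x, st.2 ++ [st.1 + x])) (0, [0])).2
      = (List.range (Arr.length + 1)).map (P Arr) := by
  rw [foldl_prefix]
  simp only [List.range_succ_eq_map, List.map_cons, List.map_map]
  simp [P, Function.comp]
lemma pyGetD_pre (Arr : List Int) (i : Int) (h0 : 0 ≤ i) (h1 : i ≤ Arr.length) :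
    PySem.List.pyGetD ((List.range (Arr.length + 1)).map (P Arr)) i 0 = P Arr i.toNat := by
  rw [PySem.List.pyGetD_eq_getElem _ _ h0 (by simp; omega)]
  simp

lemma query2_eq_alt (N : Int) (Arr : List Int) (L : Int) (R : Int) (hpre : Pre_query2 N Arr L R) :
    query2 N Arr L R = query2_alt N Arr L R := by
  obtain ⟨hn, ha1, ha2, hb1, hb2, hcond⟩ := hpre
  have hn' : 0 < (Arr.length : Int) := by exact_mod_cast hn
  simp only [query2, query2_alt, pre_eq]
  congr 1
  by_cases hab : L - 1 ≤ R - 1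
  · rw [if_pos hab] at hcond
    obtain ⟨hN, hspan⟩ := hcond
    by_cases ha0 : 0 ≤ L - 1
    · -- both endpoints nonnegative: plain segment
      rw [if_neg (by omega : ¬ L - 1 < 0), if_neg (by omega : ¬ R - 1 < 0), if_pos hab]
      rw [loop_nowrap Arr N (R - 1) (by omega) _ (L - 1) 0 ha0 hab hN (by omega)]
      rw [PySem.List.pyGetD_of_nonneg _ _ (by omega : (0:Int) ≤ R - 1)]
      rw [pyGetD_pre Arr (R - 1 + 1) (by omega) (by omega), pyGetD_pre Arr (L - 1) ha0 (by omega)]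
      rw [(by omega : (R - 1 + 1).toNat = (R - 1).toNat + 1), P_succ Arr (R - 1).toNat (by omega)]
      ring
    · by_cases hb0 : 0 ≤ R - 1
      · -- crossing segment: negative start, nonnegative end
        rw [if_pos (by omega : L - 1 < 0), if_neg (by omega : ¬ R - 1 < 0), if_neg (by omega)]
        rw [loop_cross Arr N (R - 1) hb0 (by omega) _ (L - 1) 0 ha1 (by omega) hN (by omega)]
        rw [PySem.List.pyGetD_of_nonneg _ _ hb0]
        rw [pyGetD_pre Arr (R - 1 + 1) (by omega) (by omega),
          pyGetD_pre Arr (L - 1 + Arr.length) (by omega) (by omega),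
          pyGetD_pre Arr (Arr.length : Int) (by omega) (by omega)]
        rw [(by omega : (R - 1 + 1).toNat = (R - 1).toNat + 1), P_succ Arr (R - 1).toNat (by omega)]
        rw [(by omega : ((Arr.length : Int) + (L - 1)).toNat = ((L - 1) + (Arr.length : Int)).toNat)]
        simp only [Int.toNat_natCast]
        ring
      · -- both endpoints negative
        rw [if_pos (by omega : L - 1 < 0), if_pos (by omega : R - 1 < 0), if_pos (by omega)]
        rw [loop_negseg Arr N (R - 1) (by omega) _ (L - 1) 0 ha1 hab hN (by omega)]
        rw [pyGetD_negIdx Arr (R - 1) hb1 (by omega)]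
        rw [pyGetD_pre Arr (R - 1 + Arr.length + 1) (by omega) (by omega),
          pyGetD_pre Arr (L - 1 + Arr.length) (by omega) (by omega)]
        rw [(by omega : (R - 1 + (Arr.length : Int) + 1).toNat = ((Arr.length : Int) + (R - 1)).toNat + 1),
          P_succ Arr ((Arr.length : Int) + (R - 1)).toNat (by omega)]
        rw [(by omega : ((Arr.length : Int) + (L - 1)).toNat = ((L - 1) + (Arr.length : Int)).toNat)]
        ring
  · rw [if_neg hab] at hcond
    obtain ⟨hb0, hNn⟩ := hcond
    subst hNn
    rw [if_neg (by omega : ¬ L - 1 < 0), if_neg (by omega : ¬ R - 1 < 0), if_neg hab]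
    rw [loop_wrap Arr (R - 1) hb0 (by omega) _ (L - 1) 0 (by omega) (by omega) (by omega)]
    rw [PySem.List.pyGetD_of_nonneg _ _ hb0]
    rw [pyGetD_pre Arr (R - 1 + 1) (by omega) (by omega),
      pyGetD_pre Arr (L - 1) (by omega) (by omega),
      pyGetD_pre Arr (Arr.length : Int) (by omega) (by omega)]
    rw [(by omega : (R - 1 + 1).toNat = (R - 1).toNat + 1), P_succ Arr (R - 1).toNat (by omega)]
    simp only [Int.toNat_natCast]
    ring

-- ===== VERDICT (by name: the statement is the Claim_ definition above) =====
theorem query2_spec : Claim_equal_query2 := by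
  intro N Arr L R _ hpre
  exact query2_eq_alt N Arr L R hpre
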